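-- pv_equiv track=rewrite | github.com/closer76/hackerrank_challenges | 00_Solved/BombermanGame.py | transist
-- ===== SOURCE A (Python) =====
-- def transist(grid):
--     r = len(grid)
--     c = len(grid[0])
--     result = [['O' for _ in row] for row in grid]
--     for x in range(r):
--         for y in range(c):
--             if grid[x][y] == 'O' or \
--                (x > 0 and grid[x-1][y] == 'O') or \
--                (y > 0 and grid[x][y-1] == 'O') or \
--                (x < r - 1 and grid[x+1][y] == 'O' or \
--                (y < c - 1 and grid[x][y+1] == 'O')):
--                 result[x][y] = '.'
--     return result
-- ===== SOURCE B (Python) =====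
-- def transist(grid):
--     r = len(grid)
--     c = len(grid[0])
--     result = [['O'] * len(row) for row in grid]
--     for x, row in enumerate(grid):
--         for y in range(c):
--             if row[y] == 'O':
--                 for nx, ny in ((x, y), (x - 1, y), (x + 1, y), (x, y - 1), (x, y + 1)):
--                     if 0 <= nx < r and 0 <= ny < c:
--                         result[nx][ny] = '.'
--     return result
-- ===== Notes on version B (the rewrite author's own statement) =====
-- stated objective: alternative
-- what changed: B scatters: it initializes an all-'O' result, then for each 'O' source cell writes '.' to it and its in-bounds orthogonal neighbors, instead of A's per-cell gather that tests up to five neighbor conditions at every position.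
import Mathlib
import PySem

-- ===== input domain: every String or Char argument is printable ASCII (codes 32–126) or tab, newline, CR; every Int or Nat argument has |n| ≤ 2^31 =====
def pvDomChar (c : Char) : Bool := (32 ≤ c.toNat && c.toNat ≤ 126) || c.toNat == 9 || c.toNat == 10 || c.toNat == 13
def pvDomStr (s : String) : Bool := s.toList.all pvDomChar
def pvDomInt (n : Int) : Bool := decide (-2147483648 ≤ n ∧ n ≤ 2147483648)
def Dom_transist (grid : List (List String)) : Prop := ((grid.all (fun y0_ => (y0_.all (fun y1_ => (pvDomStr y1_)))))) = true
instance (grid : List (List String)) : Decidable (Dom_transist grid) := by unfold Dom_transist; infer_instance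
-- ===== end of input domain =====

-- B scatters '.' from each 'O' source cell to its in-bounds orthogonal neighbors over an all-'O' result, instead of A's per-cell five-way gather test; an alternative decomposition of the same transition.


-- ===== PORT A =====
-- grid[x][y], total form (in range under Pre_ and the loop bounds)
def pyCell (grid : List (List String)) (x y : Int) : String :=
  PySem.List.pyGetD (PySem.List.pyGetD grid x []) y ""

-- result[x][y] = '.'
def pyWrite (res : List (List String)) (x y : Int) : List (List String) :=
  PySem.List.pySetD res x (PySem.List.pySetD (PySem.List.pyGetD res x []) y ".")

def transist (grid : List (List String)) : List (List String) :=
  let r : Int := PySem.List.len grid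
  let c : Int := PySem.List.len (PySem.List.pyGetD grid 0 [])
  let result := grid.map (fun row => row.map (fun _ => "O"))
  (PySem.List.pyRange 0 r 1).foldl (fun result x =>
    (PySem.List.pyRange 0 c 1).foldl (fun result y =>
      if pyCell grid x y = "O"
         ∨ (0 < x ∧ pyCell grid (x - 1) y = "O")
         ∨ (0 < y ∧ pyCell grid x (y - 1) = "O")
         ∨ ((x < r - 1 ∧ pyCell grid (x + 1) y = "O")
            ∨ (y < c - 1 ∧ pyCell grid x (y + 1) = "O"))
      then pyWrite result x y
      else result) result) result

-- ===== PORT B =====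
def transist_alt (grid : List (List String)) : List (List String) :=
  let r : Int := PySem.List.len grid
  let c : Int := PySem.List.len (PySem.List.pyGetD grid 0 [])
  let result := grid.map (fun row => List.replicate row.length "O")
  (PySem.List.enumerate grid 0).foldl (fun result xr =>
    (PySem.List.pyRange 0 c 1).foldl (fun result y =>
      if PySem.List.pyGetD xr.2 y "" = "O" then
        [(xr.1, y), (xr.1 - 1, y), (xr.1 + 1, y), (xr.1, y - 1), (xr.1, y + 1)].foldl
          (fun result p =>
            if 0 ≤ p.1 ∧ p.1 < r ∧ 0 ≤ p.2 ∧ p.2 < c then pyWrite result p.1 p.2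
            else result) result
      else result) result) result

-- ===== PRECONDITION & SPEC =====
-- Pre_ excludes exactly the inputs on which the Python A raises IndexError: the empty grid
-- (grid[0]) and grids having a row shorter than the first row (grid[x][y] inside the scan).
def Pre_transist (grid : List (List String)) : Prop :=
  grid ≠ [] ∧ ∀ row ∈ grid, (grid.headD []).length ≤ row.length
instance (grid : List (List String)) : Decidable (Pre_transist grid) := by
  unfold Pre_transist; infer_instance
def pvWitness_transist : List (List String) := [["O", "."], [".", "."]]

def Spec_transist (grid : List (List String)) (out : List (List String)) : Prop := out = transist_alt grid
instance (grid : List (List String)) (out : List (List String)) : Decidable (Spec_transist grid out) := by unfold Spec_transist; infer_instance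

-- ===== CLAIM (what is proved, stated in full; the proofs are below) =====
def Claim_equal_transist : Prop := ∀ (grid : List (List String)), Dom_transist grid → Pre_transist grid → Spec_transist grid (transist grid)

-- ===== LEMMAS AND PROOFS =====

-- cell (i, j) of the grid at Nat indices, total with defaults
def cellA (g : List (List String)) (i j : Nat) : String := (g.getD i []).getD j ""

-- writing '.' at Nat indices
def Wn (g : List (List String)) (i j : Nat) : List (List String) :=
  g.set i ((g.getD i []).set j ".")

def applyW (ws : List (Nat × Nat)) (g : List (List String)) : List (List String) :=
  ws.foldl (fun g p => Wn g p.1 p.2) g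

-- reading cell (a, b) as an Option
def get2 (g : List (List String)) (a b : Nat) : Option String :=
  g[a]?.bind (fun row => row[b]?)

-- A's write positions: the per-cell gather condition, as a Bool
def condA (g : List (List String)) (r c i j : Nat) : Bool :=
  (cellA g i j == "O") || (decide (0 < i) && (cellA g (i - 1) j == "O"))
    || (decide (0 < j) && (cellA g i (j - 1) == "O"))
    || ((decide (i + 1 < r) && (cellA g (i + 1) j == "O"))
        || (decide (j + 1 < c) && (cellA g i (j + 1) == "O")))

def wsA (g : List (List String)) (r c : Nat) : List (Nat × Nat) :=
  (List.range r).flatMap (fun i =>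
    ((List.range c).filter (condA g r c i)).map (fun j => (i, j)))

-- B's write positions: in-bounds targets scattered from source (i, j)
def tgts (r c i j : Nat) : List (Nat × Nat) :=
  [(i, j)] ++ (if 0 < i then [(i - 1, j)] else []) ++ (if i + 1 < r then [(i + 1, j)] else [])
    ++ (if 0 < j then [(i, j - 1)] else []) ++ (if j + 1 < c then [(i, j + 1)] else [])

def wsB (g : List (List String)) (r c : Nat) : List (Nat × Nat) :=
  (List.range r).flatMap (fun i =>
    ((List.range c).filter (fun j => decide (cellA g i j = "O"))).flatMap (fun j => tgts r c i j))

theorem condA_eq_true_iff (g : List (List String)) (r c i j : Nat) :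
    condA g r c i j = true ↔
      (cellA g i j = "O" ∨ (0 < i ∧ cellA g (i - 1) j = "O") ∨ (0 < j ∧ cellA g i (j - 1) = "O")
        ∨ ((i + 1 < r ∧ cellA g (i + 1) j = "O") ∨ (j + 1 < c ∧ cellA g i (j + 1) = "O"))) := by
  simp [condA, and_comm, or_assoc]

theorem foldl_iteb {α β : Type} (l : List α) (p : α → Bool) (f : β → α → β) (g : β) :
    l.foldl (fun g a => if p a then f g a else g) g = (l.filter p).foldl f g := by
  induction l generalizing g with
  | nil => rfl
  | cons x xs ih => by_cases h : p x <;> simp [List.foldl_cons, h, ih]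

theorem get2_Wn (g : List (List String)) (i j a b : Nat) :
    get2 (Wn g i j) a b =
      if a = i ∧ b = j ∧ (get2 g i j).isSome = true then some "." else get2 g a b := by
  unfold get2 Wn
  rcases Nat.lt_or_ge i g.length with hil | hil
  · have hrow : g[i]? = some g[i] := List.getElem?_eq_some_iff.mpr ⟨hil, rfl⟩
    have hgetD : g.getD i [] = g[i] := by simp [List.getD_eq_getElem?_getD, hrow]
    rw [hgetD]
    by_cases hai : a = i
    · subst hai
      rw [List.getElem?_set_self', hrow]
      simp only [Option.bind_some, true_and]
      by_cases hbj : b = j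
      · subst hbj
        rcases Nat.lt_or_ge b g[a].length with hj | hj
        · simp [hj]
        · simp [Nat.not_lt.2 hj]
      · simp [List.getElem?_set, hbj]
        intro h; exact absurd h.symm hbj
    · rw [List.getElem?_set_ne (fun h => hai h.symm)]
      simp [hai]
  · have hset : g.set i ((g.getD i []).set j ".") = g := List.set_eq_of_length_le hil
    have hnone : g[i]? = none := List.getElem?_eq_none_iff.2 hil
    rw [hset]
    by_cases hai : a = i
    · subst hai; simp [hnone]
    · simp [hai]

theorem isSome_get2_Wn (g : List (List String)) (i j a b : Nat) :
    (get2 (Wn g i j) a b).isSome = (get2 g a b).isSome := by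
  rw [get2_Wn]
  split
  · next h => rcases h with ⟨ha, hb, hs⟩; subst ha; subst hb; simp [hs]
  · rfl

theorem get2_applyW (ws : List (Nat × Nat)) (g : List (List String)) (a b : Nat) :
    get2 (applyW ws g) a b =
      if (a, b) ∈ ws ∧ (get2 g a b).isSome = true then some "." else get2 g a b := by
  induction ws generalizing g with
  | nil => simp [applyW]
  | cons w ws ih =>
    have : applyW (w :: ws) g = applyW ws (Wn g w.1 w.2) := rfl
    rw [this, ih, isSome_get2_Wn, get2_Wn]
    by_cases hw : (a, b) = w
    · have h1 : a = w.1 := by rw [← hw]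
      have h2 : b = w.2 := by rw [← hw]
      subst h1; subst h2
      by_cases hs : (get2 g w.1 w.2).isSome = true <;> simp [hs]
    · have hne : ¬ (a = w.1 ∧ b = w.2 ∧ (get2 g w.1 w.2).isSome = true) := by
        rintro ⟨h1, h2, -⟩; exact hw (by rw [h1, h2])
      rw [if_neg hne]
      by_cases hm : (a, b) ∈ ws <;> simp [hm, hw]

theorem length_Wn (g : List (List String)) (i j : Nat) : (Wn g i j).length = g.length :=
  List.length_set

theorem length_applyW (ws : List (Nat × Nat)) (g : List (List String)) :
    (applyW ws g).length = g.length := by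
  induction ws generalizing g with
  | nil => rfl
  | cons w ws ih => rw [show applyW (w :: ws) g = applyW ws (Wn g w.1 w.2) from rfl, ih, length_Wn]

theorem rowlen_Wn (g : List (List String)) (i j a : Nat) :
    ((Wn g i j)[a]?.map List.length) = (g[a]?.map List.length) := by
  unfold Wn
  by_cases hai : i = a
  · subst hai
    rcases Nat.lt_or_ge i g.length with hil | hil
    · have hrow : g[i]? = some g[i] := List.getElem?_eq_some_iff.mpr ⟨hil, rfl⟩
      have hgetD : g.getD i [] = g[i] := by simp [List.getD_eq_getElem?_getD, hrow]
      rw [hgetD, List.getElem?_set_self', hrow]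
      simp
    · rw [List.set_eq_of_length_le hil]
  · rw [List.getElem?_set_ne hai]

theorem rowlen_applyW (ws : List (Nat × Nat)) (g : List (List String)) (a : Nat) :
    ((applyW ws g)[a]?.map List.length) = (g[a]?.map List.length) := by
  induction ws generalizing g with
  | nil => rfl
  | cons w ws ih => rw [show applyW (w :: ws) g = applyW ws (Wn g w.1 w.2) from rfl, ih, rowlen_Wn]

theorem pyWrite_natCast (g : List (List String)) (i j : Nat) :
    pyWrite g (i : Int) (j : Int) = Wn g i j := by
  simp [pyWrite, Wn, List.getD_eq_getElem?_getD]

theorem pyCell_natCast (g : List (List String)) (i j : Nat) :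
    pyCell g (i : Int) (j : Int) = cellA g i j := by
  simp [pyCell, cellA, List.getD_eq_getElem?_getD]

theorem condA_cast (g : List (List String)) (r c i j : Nat) :
    (pyCell g ↑i ↑j = "O"
      ∨ (0 < (i : Int) ∧ pyCell g (↑i - 1) ↑j = "O")
      ∨ (0 < (j : Int) ∧ pyCell g ↑i (↑j - 1) = "O")
      ∨ (((i : Int) < (r : Int) - 1 ∧ pyCell g (↑i + 1) ↑j = "O")
         ∨ ((j : Int) < (c : Int) - 1 ∧ pyCell g ↑i (↑j + 1) = "O")))
    ↔ condA g r c i j = true := by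
  rw [condA_eq_true_iff]
  have e1 : ∀ x : Nat, 0 < x → ((x : Int) - 1) = ((x - 1 : Nat) : Int) := by intros; omega
  have e2 : ∀ x : Nat, ((x : Int) + 1) = ((x + 1 : Nat) : Int) := by intros; omega
  constructor
  · rintro (h | ⟨hx, h⟩ | ⟨hy, h⟩ | (⟨hx, h⟩ | ⟨hy, h⟩))
    · exact Or.inl (by rwa [pyCell_natCast] at h)
    · exact Or.inr (Or.inl ⟨by omega, by rwa [e1 i (by omega), pyCell_natCast] at h⟩)
    · exact Or.inr (Or.inr (Or.inl ⟨by omega, by rwa [e1 j (by omega), pyCell_natCast] at h⟩))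
    · exact Or.inr (Or.inr (Or.inr (Or.inl ⟨by omega, by rwa [e2 i, pyCell_natCast] at h⟩)))
    · exact Or.inr (Or.inr (Or.inr (Or.inr ⟨by omega, by rwa [e2 j, pyCell_natCast] at h⟩)))
  · rintro (h | ⟨hx, h⟩ | ⟨hy, h⟩ | (⟨hx, h⟩ | ⟨hy, h⟩))
    · exact Or.inl (by rwa [pyCell_natCast])
    · exact Or.inr (Or.inl ⟨by omega, by rw [e1 i (by omega), pyCell_natCast]; exact h⟩)
    · exact Or.inr (Or.inr (Or.inl ⟨by omega, by rw [e1 j (by omega), pyCell_natCast]; exact h⟩))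
    · exact Or.inr (Or.inr (Or.inr (Or.inl ⟨by omega, by rw [e2 i, pyCell_natCast]; exact h⟩)))
    · exact Or.inr (Or.inr (Or.inr (Or.inr ⟨by omega, by rw [e2 j, pyCell_natCast]; exact h⟩)))

theorem foldl_fun_congr {α β : Type} (l : List α) (f g : β → α → β)
    (h : ∀ b a, f b a = g b a) (init : β) : l.foldl f init = l.foldl g init := by
  have : f = g := funext fun b => funext (h b)
  rw [this]

theorem foldl_ite {α β : Type} (l : List α) (p : α → Prop) [DecidablePred p]
    (f : β → α → β) (g : β) :
    l.foldl (fun g a => if p a then f g a else g) g =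
      (l.filter (fun a => decide (p a))).foldl f g := by
  induction l generalizing g with
  | nil => rfl
  | cons x xs ih =>
    by_cases h : p x <;> simp [List.foldl_cons, h, ih]

theorem transist_eq_applyW (g : List (List String)) :
    transist g = applyW (wsA g g.length (g.getD 0 []).length)
      (g.map (fun row => row.map (fun _ => "O"))) := by
  unfold transist
  simp only [PySem.List.len_eq, PySem.List.pyGetD_zero, PySem.List.pyRange_zero_natCast,
    List.foldl_map]
  rw [applyW, wsA, List.foldl_flatMap]
  refine foldl_fun_congr _ _ _ (fun res i => ?_) _
  conv_rhs => rw [List.foldl_map]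
  calc (List.range (g.getD 0 []).length).foldl (fun res (j : Nat) =>
        if pyCell g ↑i ↑j = "O"
           ∨ (0 < (i : Int) ∧ pyCell g (↑i - 1) ↑j = "O")
           ∨ (0 < (j : Int) ∧ pyCell g ↑i (↑j - 1) = "O")
           ∨ (((i : Int) < (g.length : Int) - 1 ∧ pyCell g (↑i + 1) ↑j = "O")
              ∨ ((j : Int) < ((g.getD 0 []).length : Int) - 1 ∧ pyCell g ↑i (↑j + 1) = "O"))
        then pyWrite res ↑i ↑j
        else res) res
      = (List.range (g.getD 0 []).length).foldl (fun res j =>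
          if condA g g.length (g.getD 0 []).length i j = true then Wn res i j else res) res := by
        refine foldl_fun_congr _ _ _ (fun res j => ?_) _
        exact if_congr (condA_cast g g.length (g.getD 0 []).length i j)
          (pyWrite_natCast res i j) rfl
    _ = ((List.range (g.getD 0 []).length).filter
          (condA g g.length (g.getD 0 []).length i)).foldl
          (fun res j => Wn res i j) res := foldl_iteb _ _ _ _
    _ = ((List.range (g.getD 0 []).length).filter
          (condA g g.length (g.getD 0 []).length i)).foldl
          (fun res j => Wn res (i, j).1 (i, j).2) res := rfl

theorem bstep (r c : Nat) (res : List (List String)) (x y : Int) :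
    (if 0 ≤ x ∧ x < (r : Int) ∧ 0 ≤ y ∧ y < (c : Int) then pyWrite res x y else res)
    = if 0 ≤ x ∧ x < (r : Int) ∧ 0 ≤ y ∧ y < (c : Int) then Wn res x.toNat y.toNat else res := by
  split_ifs with h
  · obtain ⟨hx, -, hy, -⟩ := h
    rw [show x = ((x.toNat : Nat) : Int) from by omega, show y = ((y.toNat : Nat) : Int) from by omega,
      pyWrite_natCast]
    rw [show (((x.toNat : Nat) : Int)).toNat = x.toNat from by omega,
        show (((y.toNat : Nat) : Int)).toNat = y.toNat from by omega]
  · rfl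

theorem tgts_fold (r c i j : Nat) (hi : i < r) (hj : j < c) (res : List (List String)) :
    ([((i : Int), (j : Int)), (↑i - 1, ↑j), (↑i + 1, ↑j), (↑i, ↑j - 1), (↑i, ↑j + 1)] :
        List (Int × Int)).foldl
      (fun res p => if 0 ≤ p.1 ∧ p.1 < (r : Int) ∧ 0 ≤ p.2 ∧ p.2 < (c : Int)
        then pyWrite res p.1 p.2 else res) res
    = applyW (tgts r c i j) res := by
  rw [foldl_fun_congr _ _
    (fun res (p : Int × Int) => if 0 ≤ p.1 ∧ p.1 < (r : Int) ∧ 0 ≤ p.2 ∧ p.2 < (c : Int)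
      then Wn res p.1.toNat p.2.toNat else res)
    (fun res p => bstep r c res p.1 p.2) res]
  simp only [List.foldl_cons, List.foldl_nil, tgts, applyW, List.foldl_append]
  rw [show ((i : Int)).toNat = i from by omega, show ((i : Int) - 1).toNat = i - 1 from by omega,
      show ((i : Int) + 1).toNat = i + 1 from by omega, show ((j : Int)).toNat = j from by omega,
      show ((j : Int) - 1).toNat = j - 1 from by omega, show ((j : Int) + 1).toNat = j + 1 from by omega]
  split_ifs <;> first | omega | simp [List.foldl_cons, List.foldl_nil]

theorem transist_alt_eq_applyW (g : List (List String)) :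
    transist_alt g = applyW (wsB g g.length (g.getD 0 []).length)
      (g.map (fun row => List.replicate row.length "O")) := by
  unfold transist_alt
  rw [PySem.List.enumerate_eq_map_pyRange g []]
  simp only [PySem.List.len_eq, PySem.List.pyRange_zero_natCast, PySem.List.pyGetD_zero,
    List.foldl_map, PySem.List.pyGetD_natCast]
  rw [applyW, wsB, List.foldl_flatMap]
  refine PySem.List.foldl_congr_mem _ _ _ _ (fun acc i hi => ?_)
  rw [List.mem_range] at hi
  rw [List.foldl_flatMap]
  have hL : (List.range (g.getD 0 []).length).foldl (fun res (j : Nat) =>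
      if (g.getD i []).getD j "" = "O" then
        ([((i : Int), (j : Int)), (↑i - 1, ↑j), (↑i + 1, ↑j), (↑i, ↑j - 1), (↑i, ↑j + 1)] :
            List (Int × Int)).foldl
          (fun res p => if 0 ≤ p.1 ∧ p.1 < (g.length : Int) ∧ 0 ≤ p.2 ∧
              p.2 < ((g.getD 0 []).length : Int)
            then pyWrite res p.1 p.2 else res) res
      else res) acc
      = ((List.range (g.getD 0 []).length).filter
          (fun j => decide (cellA g i j = "O"))).foldl
          (fun res j => applyW (tgts g.length (g.getD 0 []).length i j) res) acc := by
    rw [foldl_ite _ (fun j => (g.getD i []).getD j "" = "O")]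
    show _ = _
    refine PySem.List.foldl_congr_mem _ _ _ _ (fun res j hj => ?_)
    have hj' : j < (g.getD 0 []).length := List.mem_range.mp (List.mem_of_mem_filter hj)
    exact tgts_fold g.length (g.getD 0 []).length i j hi hj' res
  exact hL

theorem mem_tgts (r c i j a b : Nat) :
    (a, b) ∈ tgts r c i j ↔
      (a = i ∧ b = j) ∨ (0 < i ∧ a = i - 1 ∧ b = j) ∨ (i + 1 < r ∧ a = i + 1 ∧ b = j)
        ∨ (0 < j ∧ a = i ∧ b = j - 1) ∨ (j + 1 < c ∧ a = i ∧ b = j + 1) := by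
  unfold tgts
  split_ifs <;> simp_all [Prod.ext_iff] <;> omega

theorem mem_wsA (g : List (List String)) (r c a b : Nat) :
    (a, b) ∈ wsA g r c ↔ a < r ∧ b < c ∧ condA g r c a b = true := by
  simp only [wsA, List.mem_flatMap, List.mem_map, List.mem_filter, List.mem_range]
  constructor
  · rintro ⟨i, hi, j, ⟨⟨hj, hc⟩, hij⟩⟩
    obtain ⟨h1, h2⟩ := Prod.mk.injEq .. ▸ hij
    subst h1; subst h2
    exact ⟨hi, hj, hc⟩
  · rintro ⟨ha, hb, hc⟩
    exact ⟨a, ha, b, ⟨⟨hb, hc⟩, rfl⟩⟩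

theorem mem_wsB (g : List (List String)) (r c a b : Nat) :
    (a, b) ∈ wsB g r c ↔
      ∃ i j, i < r ∧ j < c ∧ cellA g i j = "O" ∧ (a, b) ∈ tgts r c i j := by
  simp only [wsB, List.mem_flatMap, List.mem_filter, List.mem_range]
  constructor
  · rintro ⟨i, hi, j, ⟨⟨hj, hc⟩, hm⟩⟩
    exact ⟨i, j, hi, hj, of_decide_eq_true hc, hm⟩
  · rintro ⟨i, j, hi, hj, hc, hm⟩
    exact ⟨i, hi, j, ⟨⟨hj, decide_eq_true hc⟩, hm⟩⟩

theorem wsA_iff_wsB (g : List (List String)) (r c a b : Nat) :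
    (a, b) ∈ wsA g r c ↔ (a, b) ∈ wsB g r c := by
  rw [mem_wsA, mem_wsB, condA_eq_true_iff]
  constructor
  · rintro ⟨ha, hb, h | ⟨hx, h⟩ | ⟨hy, h⟩ | (⟨hx, h⟩ | ⟨hy, h⟩)⟩
    · exact ⟨a, b, ha, hb, h, (mem_tgts ..).mpr (Or.inl ⟨rfl, rfl⟩)⟩
    · exact ⟨a - 1, b, by omega, hb, h,
        (mem_tgts ..).mpr (Or.inr (Or.inr (Or.inl ⟨by omega, by omega, rfl⟩)))⟩
    · exact ⟨a, b - 1, ha, by omega, h,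
        (mem_tgts ..).mpr (Or.inr (Or.inr (Or.inr (Or.inr ⟨by omega, rfl, by omega⟩))))⟩
    · exact ⟨a + 1, b, by omega, hb, h,
        (mem_tgts ..).mpr (Or.inr (Or.inl ⟨by omega, by omega, rfl⟩))⟩
    · exact ⟨a, b + 1, ha, by omega, h,
        (mem_tgts ..).mpr (Or.inr (Or.inr (Or.inr (Or.inl ⟨by omega, rfl, by omega⟩))))⟩
  · rintro ⟨i, j, hi, hj, hc, hm⟩
    rw [mem_tgts] at hm
    rcases hm with ⟨h1, h2⟩ | ⟨h0, h1, h2⟩ | ⟨h0, h1, h2⟩ | ⟨h0, h1, h2⟩ | ⟨h0, h1, h2⟩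
    · subst h1; subst h2; exact ⟨hi, hj, Or.inl hc⟩
    · refine ⟨by omega, by omega, Or.inr (Or.inr (Or.inr (Or.inl ⟨by omega, ?_⟩)))⟩
      have : a + 1 = i := by omega
      rwa [this, h2]
    · refine ⟨by omega, by omega, Or.inr (Or.inl ⟨by omega, ?_⟩)⟩
      have : a - 1 = i := by omega
      rwa [this, h2]
    · refine ⟨by omega, by omega, Or.inr (Or.inr (Or.inr (Or.inr ⟨by omega, ?_⟩)))⟩
      have : b + 1 = j := by omega
      rwa [this, h1]
    · refine ⟨by omega, by omega, Or.inr (Or.inr (Or.inl ⟨by omega, ?_⟩))⟩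
      have : b - 1 = j := by omega
      rwa [this, h1]

theorem ports_eq (g : List (List String)) : transist g = transist_alt g := by
  rw [transist_eq_applyW, transist_alt_eq_applyW]
  have hinit : g.map (fun row => row.map (fun _ => "O"))
      = g.map (fun row => List.replicate row.length "O") := by
    refine List.map_congr_left (fun row _ => ?_)
    exact List.map_const
  rw [hinit]
  set init := g.map (fun row => List.replicate row.length "O") with hinitdef
  set r := g.length
  set c := (g.getD 0 []).length
  have hget : ∀ a b : Nat, get2 (applyW (wsA g r c) init) a b = get2 (applyW (wsB g r c) init) a b := by
    intro a b
    rw [get2_applyW, get2_applyW]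
    exact if_congr (and_congr_left' (wsA_iff_wsB g r c a b)) rfl rfl
  have hlen : (applyW (wsA g r c) init).length = (applyW (wsB g r c) init).length := by
    rw [length_applyW, length_applyW]
  have hrow : ∀ a : Nat, ((applyW (wsA g r c) init)[a]?.map List.length)
      = ((applyW (wsB g r c) init)[a]?.map List.length) := by
    intro a; rw [rowlen_applyW, rowlen_applyW]
  refine List.ext_getElem hlen (fun a ha1 ha2 => ?_)
  have hrlen : (applyW (wsA g r c) init)[a].length = (applyW (wsB g r c) init)[a].length := by
    have := hrow a
    rw [List.getElem?_eq_some_iff.mpr ⟨ha1, rfl⟩, List.getElem?_eq_some_iff.mpr ⟨ha2, rfl⟩] at this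
    simpa using this
  refine List.ext_getElem hrlen (fun b hb1 hb2 => ?_)
  have e1 : get2 (applyW (wsA g r c) init) a b = some (applyW (wsA g r c) init)[a][b] := by
    simp [get2, List.getElem?_eq_some_iff.mpr ⟨ha1, rfl⟩, List.getElem?_eq_some_iff.mpr ⟨hb1, rfl⟩]
  have e2 : get2 (applyW (wsB g r c) init) a b = some (applyW (wsB g r c) init)[a][b] := by
    simp [get2, List.getElem?_eq_some_iff.mpr ⟨ha2, rfl⟩, List.getElem?_eq_some_iff.mpr ⟨hb2, rfl⟩]
  have := hget a b
  rw [e1, e2] at this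
  exact Option.some.inj this

-- ===== VERDICT (by name: the statement is the Claim_ definition above) =====
theorem transist_spec : Claim_equal_transist := by
  intro grid _ _
  unfold Spec_transist
  exact ports_eq grid
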